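-- pv_equiv track=rewrite | github.com/Phong940253/knowledge-base-system-excercise-3 | Specification-Language/SentenceForm.py | splitArrayByValue
-- ===== SOURCE A (Python) =====
-- def splitArrayByValue(array1, array2, value):
--     result1 = []
--     result2 = []
--     temp1 = []
--     temp2 = []
--     for i in range(len(array2)):
--         if array2[i] == value:
--             if len(temp1) > 0:
--                 result1.append(temp1)
--                 result2.append(temp2)
--                 temp1 = []
--                 temp2 = []
--         else:
--             temp1.append(array1[i])
--             temp2.append(array2[i])
--     if len(temp1) > 0:
--         result1.append(temp1)
--         result2.append(temp2)
--
--     return result1, result2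
-- ===== SOURCE B (Python) =====
-- def splitArrayByValue(array1, array2, value):
--     # Compute the maximal non-separator runs of array2 as (start, end) index
--     # pairs first, then materialize both groups by slicing.
--     n = len(array2)
--     runs = []
--     start = None
--     for i in range(n):
--         if array2[i] == value:
--             if start is not None:
--                 runs.append((start, i))
--                 start = None
--         elif start is None:
--             start = i
--     if start is not None:
--         runs.append((start, n))
--     return [array1[s:e] for s, e in runs], [array2[s:e] for s, e in runs]
-- ===== Notes on version B (the rewrite author's own statement) =====
-- stated objective: alternative
-- what changed: B first computes the maximal non-separator runs as (start,end) index pairs and then builds both outputs by slicing, replacing A's parallel temp-list accumulators and double flush logic.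
-- outside the precondition, e.g. on splitArrayByValue([1], [5, 6], 0): A raises IndexError, B returns ([[1]], [[5, 6]])
import Mathlib
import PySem

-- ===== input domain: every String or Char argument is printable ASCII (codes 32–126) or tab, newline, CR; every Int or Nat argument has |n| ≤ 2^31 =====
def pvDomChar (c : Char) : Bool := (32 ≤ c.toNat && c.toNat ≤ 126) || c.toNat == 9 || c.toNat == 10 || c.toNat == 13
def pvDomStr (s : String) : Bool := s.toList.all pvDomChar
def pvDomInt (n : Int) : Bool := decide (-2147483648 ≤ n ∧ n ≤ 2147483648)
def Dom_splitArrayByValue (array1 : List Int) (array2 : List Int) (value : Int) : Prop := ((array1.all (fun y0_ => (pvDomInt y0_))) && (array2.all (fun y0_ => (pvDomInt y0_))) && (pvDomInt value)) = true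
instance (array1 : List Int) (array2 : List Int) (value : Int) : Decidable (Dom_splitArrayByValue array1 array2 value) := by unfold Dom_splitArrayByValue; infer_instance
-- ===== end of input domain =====

-- ===== PORT A =====
-- B computes the maximal non-separator runs as index pairs and then slices;
-- the equivalence is about the return value (neither program mutates its arguments).

-- one iteration of A's for-loop; state = (result1, result2, temp1, temp2)
def aStep (array1 array2 : List Int) (value : Int)
    (st : List (List Int) × List (List Int) × List Int × List Int) (i : Nat) :
    List (List Int) × List (List Int) × List Int × List Int :=
  if array2.getD i 0 = value then
    if st.2.2.1.length > 0 then (st.1 ++ [st.2.2.1], st.2.1 ++ [st.2.2.2], [], []) else st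
  else
    (st.1, st.2.1, st.2.2.1 ++ [array1.getD i 0], st.2.2.2 ++ [array2.getD i 0])

-- array2[i] is always in range; array1[i] is in range on Pre_ (outside Pre_ Python raises)
def splitArrayByValue (array1 : List Int) (array2 : List Int) (value : Int) :
    List (List Int) × List (List Int) :=
  let st := (List.range array2.length).foldl (aStep array1 array2 value) ([], [], [], [])
  if st.2.2.1.length > 0 then (st.1 ++ [st.2.2.1], st.2.1 ++ [st.2.2.2]) else (st.1, st.2.1)

-- ===== PORT B =====
-- one iteration of B's run-finding loop; state = (runs, start)
def bStep (array2 : List Int) (value : Int)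
    (st : List (Nat × Nat) × Option Nat) (i : Nat) : List (Nat × Nat) × Option Nat :=
  if array2.getD i 0 = value then
    match st.2 with
    | some s => (st.1 ++ [(s, i)], none)
    | none => st
  else
    match st.2 with
    | none => (st.1, some i)
    | some _ => st

-- xs[s:e] with 0 ≤ s ≤ e is (xs.drop s).take (e - s)  (exact: PySem.List.slice_natCast)
def splitArrayByValue_alt (array1 : List Int) (array2 : List Int) (value : Int) :
    List (List Int) × List (List Int) :=
  let n := array2.length
  let st := (List.range n).foldl (bStep array2 value) ([], none)
  let runs : List (Nat × Nat) :=
    match st.2 with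
    | some s => st.1 ++ [(s, n)]
    | none => st.1
  (runs.map (fun r => (array1.drop r.1).take (r.2 - r.1)),
   runs.map (fun r => (array2.drop r.1).take (r.2 - r.1)))

-- ===== PRECONDITION & SPEC =====
-- Pre_ excludes exactly the inputs where A raises IndexError: a non-separator
-- position of array2 with no matching element in array1.
def Pre_splitArrayByValue (array1 : List Int) (array2 : List Int) (value : Int) : Prop :=
  ∀ i < array2.length, array2.getD i 0 = value ∨ i < array1.length
instance (array1 : List Int) (array2 : List Int) (value : Int) :
    Decidable (Pre_splitArrayByValue array1 array2 value) := by
  unfold Pre_splitArrayByValue; infer_instance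
def pvWitness_splitArrayByValue : List Int × List Int × Int := ([1, 2, 3], [4, 0, 5], 0)

def Spec_splitArrayByValue (array1 : List Int) (array2 : List Int) (value : Int) (out : List (List Int) × List (List Int)) : Prop := out = splitArrayByValue_alt array1 array2 value
instance (array1 : List Int) (array2 : List Int) (value : Int) (out : List (List Int) × List (List Int)) : Decidable (Spec_splitArrayByValue array1 array2 value out) := by unfold Spec_splitArrayByValue; infer_instance

-- ===== CLAIM (what is proved, stated in full; the proofs are below) =====
def Claim_equal_splitArrayByValue : Prop := ∀ (array1 : List Int) (array2 : List Int) (value : Int), Dom_splitArrayByValue array1 array2 value → Pre_splitArrayByValue array1 array2 value → Spec_splitArrayByValue array1 array2 value (splitArrayByValue array1 array2 value)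

-- ===== LEMMAS AND PROOFS =====

-- relation between A's state and B's state after processing indices [0, k)
def pvRel (array1 array2 : List Int) (k : Nat)
    (sa : List (List Int) × List (List Int) × List Int × List Int)
    (sb : List (Nat × Nat) × Option Nat) : Prop :=
  sa.1 = sb.1.map (fun r => (array1.drop r.1).take (r.2 - r.1)) ∧
  sa.2.1 = sb.1.map (fun r => (array2.drop r.1).take (r.2 - r.1)) ∧
  (match sb.2 with
   | none => sa.2.2.1 = [] ∧ sa.2.2.2 = []
   | some s => s < k ∧ sa.2.2.1 ≠ [] ∧
       sa.2.2.1 = (array1.drop s).take (k - s) ∧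
       sa.2.2.2 = (array2.drop s).take (k - s))

theorem take_drop_snoc (l : List Int) (s k : Nat) (hs : s ≤ k) (hk : k < l.length) :
    (l.drop s).take (k - s) ++ [l.getD k 0] = (l.drop s).take (k + 1 - s) := by
  have h1 : k + 1 - s = (k - s) + 1 := by omega
  rw [h1, List.take_add_one]
  have h2 : (l.drop s)[k - s]? = l[k]? := by
    rw [List.getElem?_drop]; congr 1; omega
  have h3 : l[k]? = some l[k] := List.getElem?_eq_getElem hk
  rw [h2, h3, List.getD_eq_getElem?_getD, h3]
  rfl

theorem rel_step (array1 array2 : List Int) (value : Int)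
    (hpre : Pre_splitArrayByValue array1 array2 value)
    (k : Nat) (hk : k < array2.length)
    (sa : List (List Int) × List (List Int) × List Int × List Int)
    (sb : List (Nat × Nat) × Option Nat)
    (h : pvRel array1 array2 k sa sb) :
    pvRel array1 array2 (k + 1) (aStep array1 array2 value sa k) (bStep array2 value sb k) := by
  obtain ⟨r1, r2, t1, t2⟩ := sa
  obtain ⟨runs, start⟩ := sb
  cases start with
  | none =>
    simp only [pvRel] at h
    obtain ⟨h1, h2, ht1, ht2⟩ := h
    subst ht1; subst ht2
    by_cases hv : array2.getD k 0 = value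
    · simp only [bStep, aStep, if_pos hv, pvRel]
      simp [h1, h2]
    · have hk1 : k < array1.length := (hpre k hk).resolve_left hv
      simp only [bStep, aStep, if_neg hv, pvRel]
      refine ⟨h1, h2, Nat.lt_succ_self k, by simp, ?_, ?_⟩
      · simpa using take_drop_snoc array1 k k le_rfl hk1
      · simpa using take_drop_snoc array2 k k le_rfl hk
  | some s =>
    simp only [pvRel] at h
    obtain ⟨h1, h2, hsk, hne, ht1, ht2⟩ := h
    by_cases hv : array2.getD k 0 = value
    · have hlen : t1.length > 0 := List.length_pos_iff.mpr hne
      simp only [bStep, aStep, if_pos hv, if_pos hlen, pvRel]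
      exact ⟨by simp [h1, ht1], by simp [h2, ht2], by simp⟩
    · have hk1 : k < array1.length := (hpre k hk).resolve_left hv
      simp only [bStep, aStep, if_neg hv, pvRel]
      refine ⟨h1, h2, by omega, by simp, ?_, ?_⟩
      · rw [ht1]; exact take_drop_snoc array1 s k (by omega) hk1
      · rw [ht2]; exact take_drop_snoc array2 s k (by omega) hk

theorem rel_fold (array1 array2 : List Int) (value : Int)
    (hpre : Pre_splitArrayByValue array1 array2 value)
    (k : Nat) (hk : k ≤ array2.length) :
    pvRel array1 array2 k
      ((List.range k).foldl (aStep array1 array2 value) ([], [], [], []))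
      ((List.range k).foldl (bStep array2 value) ([], none)) := by
  induction k with
  | zero => simp [pvRel]
  | succ k ih =>
    rw [List.range_succ, List.foldl_append, List.foldl_append]
    simp only [List.foldl_cons, List.foldl_nil]
    exact rel_step array1 array2 value hpre k (by omega) _ _ (ih (by omega))

theorem finish_eq (array1 array2 : List Int) (n : Nat)
    (sa : List (List Int) × List (List Int) × List Int × List Int)
    (sb : List (Nat × Nat) × Option Nat)
    (h : pvRel array1 array2 n sa sb) :
    (if sa.2.2.1.length > 0 then (sa.1 ++ [sa.2.2.1], sa.2.1 ++ [sa.2.2.2]) else (sa.1, sa.2.1)) =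
    ((match sb.2 with | some s => sb.1 ++ [(s, n)] | none => sb.1).map
       (fun r : Nat × Nat => (array1.drop r.1).take (r.2 - r.1)),
     (match sb.2 with | some s => sb.1 ++ [(s, n)] | none => sb.1).map
       (fun r : Nat × Nat => (array2.drop r.1).take (r.2 - r.1))) := by
  obtain ⟨r1, r2, t1, t2⟩ := sa
  obtain ⟨runs, start⟩ := sb
  cases start with
  | none =>
    simp only [pvRel] at h
    obtain ⟨h1, h2, ht1, ht2⟩ := h
    subst ht1; subst ht2
    show (r1, r2) = _
    rw [h1, h2]
  | some s =>
    simp only [pvRel] at h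
    obtain ⟨h1, h2, hsk, hne, ht1, ht2⟩ := h
    have hlen : t1.length > 0 := List.length_pos_iff.mpr hne
    rw [if_pos hlen, h1, h2, ht1, ht2]
    simp only [List.map_append, List.map_cons, List.map_nil]

-- ===== VERDICT (by name: the statement is the Claim_ definition above) =====
theorem splitArrayByValue_spec : Claim_equal_splitArrayByValue := by
  intro array1 array2 value _ hpre
  unfold Spec_splitArrayByValue
  exact finish_eq array1 array2 array2.length _ _
    (rel_fold array1 array2 value hpre array2.length le_rfl)
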